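-- pv_equiv track=rewrite | github.com/ameer117/Instagram_Bot | IG BOT/seq2seqpy3.py | translateToSentences
-- ===== SOURCE A (Python) =====
-- def translateToSentences(inputs, wList, encoder=False):
--     EOStokenIndex = wList.index('<EOS>')
--     padTokenIndex = wList.index('<pad>')
--     numStrings = len(inputs[0])
--     numLengthOfStrings = len(inputs)
--     listOfStrings = [''] * numStrings
--     for mySet in inputs:
--         for index,num in enumerate(mySet):
--             if (num != EOStokenIndex and num != padTokenIndex):
--                 if (encoder):
--                     # Encodings are in reverse!
--                     listOfStrings[index] = wList[num] + " " + listOfStrings[index]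
--                 else:
--                     listOfStrings[index] = listOfStrings[index] + " " + wList[num]
--     listOfStrings = [string.strip() for string in listOfStrings]
--     return listOfStrings
-- ===== SOURCE B (Python) =====
-- def translateToSentences(inputs, wList, encoder=False):
--     EOStokenIndex = wList.index('<EOS>')
--     padTokenIndex = wList.index('<pad>')
--     numStrings = len(inputs[0])
--     sentences = []
--     for i in range(numStrings):
--         tokens = []
--         for row in inputs:
--             if i < len(row):
--                 num = row[i]
--                 if num != EOStokenIndex and num != padTokenIndex:
--                     tokens.append(wList[num])
--         if encoder:
--             tokens.reverse()
--         sentences.append(' '.join(tokens).strip())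
--     return sentences
-- ===== Notes on version B (the rewrite author's own statement) =====
-- stated objective: alternative
-- what changed: B builds each output sentence independently, column-major: for each column index it walks the rows collecting the surviving tokens, reverses once for encoder, and emits ' '.join(tokens).strip(), instead of A's row-major double loop that incrementally concatenates ' '+word into a mutated list of partial strings and strips at the end.
import Mathlib
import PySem

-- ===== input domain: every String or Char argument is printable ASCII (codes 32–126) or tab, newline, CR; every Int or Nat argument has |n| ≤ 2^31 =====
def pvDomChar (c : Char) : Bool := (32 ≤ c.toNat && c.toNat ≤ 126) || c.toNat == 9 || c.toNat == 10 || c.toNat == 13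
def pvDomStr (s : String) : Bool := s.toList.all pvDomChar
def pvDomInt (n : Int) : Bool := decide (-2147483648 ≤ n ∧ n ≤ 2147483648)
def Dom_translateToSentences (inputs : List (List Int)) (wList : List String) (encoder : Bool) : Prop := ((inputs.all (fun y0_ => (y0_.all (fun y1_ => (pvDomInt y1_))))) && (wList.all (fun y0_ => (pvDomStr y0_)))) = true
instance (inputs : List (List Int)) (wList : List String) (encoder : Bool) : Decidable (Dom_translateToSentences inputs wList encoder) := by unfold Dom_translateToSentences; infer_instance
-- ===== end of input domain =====

-- B rebuilds each sentence column-major (collect the column's surviving tokens, join once) instead of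
-- A's row-major incremental string concatenation into a mutated list of partial strings; same return value.

-- ===== PORT A =====
-- Port note: Python string values inside the loop are carried as List Char (PySem string ops are
-- defined there; Lean's own String.append is kernel-opaque); 'a + " " + b' is list append around ' ',
-- the final .strip() is PySem.Chars.strip, and 'listOfStrings[index] = v' is List.set.
def pvStepA (wList : List String) (eos pad : Int) (encoder : Bool)
    (lof : List (List Char)) (p : Int × Int) : List (List Char) :=
  if p.2 ≠ eos ∧ p.2 ≠ pad then
    if encoder then
      lof.set p.1.toNat ((((PySem.List.pyGet? wList p.2).getD "").toList) ++ ' ' :: lof.getD p.1.toNat [])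
    else
      lof.set p.1.toNat (lof.getD p.1.toNat [] ++ ' ' :: (((PySem.List.pyGet? wList p.2).getD "").toList))
  else lof

def translateToSentences (inputs : List (List Int)) (wList : List String) (encoder : Bool) : List String :=
  let eos : Int := ((PySem.List.index? wList "<EOS>").getD 0 : Nat)
  let pad : Int := ((PySem.List.index? wList "<pad>").getD 0 : Nat)
  let numStrings := (inputs.headD []).length
  let lof := inputs.foldl (fun lof mySet =>
      (PySem.List.enumerate mySet).foldl (pvStepA wList eos pad encoder) lof)
    (List.replicate numStrings ([] : List Char))
  lof.map (fun s => String.ofList (PySem.Chars.strip s))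

-- ===== PORT B =====
def pvColTokens (inputs : List (List Int)) (wList : List String) (eos pad : Int) (i : Nat) : List String :=
  inputs.foldl (fun toks row =>
    if h : i < row.length then
      if row[i] ≠ eos ∧ row[i] ≠ pad then toks ++ [(PySem.List.pyGet? wList row[i]).getD ""]
      else toks
    else toks) []

def translateToSentences_alt (inputs : List (List Int)) (wList : List String) (encoder : Bool) : List String :=
  let eos : Int := ((PySem.List.index? wList "<EOS>").getD 0 : Nat)
  let pad : Int := ((PySem.List.index? wList "<pad>").getD 0 : Nat)
  let numStrings := (inputs.headD []).length
  (List.range numStrings).map (fun i =>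
    let toks := pvColTokens inputs wList eos pad i
    PySem.Str.strip (PySem.Str.join " " (if encoder then toks.reverse else toks)))

-- ===== PRECONDITION & SPEC =====
-- Pre_ excludes exactly the inputs where the Python A raises: '<EOS>'/'<pad>' missing from wList
-- (ValueError), empty inputs (IndexError on inputs[0]), a token that is neither EOS nor pad and out of
-- wList's index range (IndexError on wList[num]), and a non-EOS/pad token sitting at a column index
-- beyond len(inputs[0]) (IndexError on the listOfStrings[index] assignment).
def Pre_translateToSentences (inputs : List (List Int)) (wList : List String) (encoder : Bool) : Prop :=
  "<EOS>" ∈ wList ∧ "<pad>" ∈ wList ∧ inputs ≠ [] ∧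
  ∀ row ∈ inputs,
    (∀ n ∈ row, ¬ (n = (((PySem.List.index? wList "<EOS>").getD 0 : Nat) : Int) ∨
                   n = (((PySem.List.index? wList "<pad>").getD 0 : Nat) : Int)) →
        -(wList.length : Int) ≤ n ∧ n < (wList.length : Int)) ∧
    (∀ n ∈ row.drop (inputs.headD []).length,
        n = (((PySem.List.index? wList "<EOS>").getD 0 : Nat) : Int) ∨
        n = (((PySem.List.index? wList "<pad>").getD 0 : Nat) : Int))
instance (inputs : List (List Int)) (wList : List String) (encoder : Bool) : Decidable (Pre_translateToSentences inputs wList encoder) := by unfold Pre_translateToSentences; infer_instance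

def pvWitness_translateToSentences : List (List Int) × List String × Bool :=
  ([[2, 3], [3, 1]], (["<EOS>", "<pad>", "a", "b"], false))

def Spec_translateToSentences (inputs : List (List Int)) (wList : List String) (encoder : Bool) (out : List String) : Prop := out = translateToSentences_alt inputs wList encoder
instance (inputs : List (List Int)) (wList : List String) (encoder : Bool) (out : List String) : Decidable (Spec_translateToSentences inputs wList encoder out) := by unfold Spec_translateToSentences; infer_instance

-- ===== CLAIM (what is proved, stated in full; the proofs are below) =====
def Claim_equal_translateToSentences : Prop := ∀ (inputs : List (List Int)) (wList : List String) (encoder : Bool), Dom_translateToSentences inputs wList encoder → Pre_translateToSentences inputs wList encoder → Spec_translateToSentences inputs wList encoder (translateToSentences inputs wList encoder)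

-- ===== LEMMAS AND PROOFS =====

-- the per-cell update A performs on one string of listOfStrings for one token
def pvUpd (wList : List String) (eos pad : Int) (encoder : Bool) (c : List Char) (num : Int) : List Char :=
  if num ≠ eos ∧ num ≠ pad then
    if encoder then (((PySem.List.pyGet? wList num).getD "").toList) ++ ' ' :: c
    else c ++ ' ' :: (((PySem.List.pyGet? wList num).getD "").toList)
  else c

-- the whole effect of A's double loop on the cell at column i
def pvCellFold (wList : List String) (eos pad : Int) (encoder : Bool) (i : Nat)
    (inputs : List (List Int)) (c : List Char) : List Char :=
  inputs.foldl (fun c row => if h : i < row.length then pvUpd wList eos pad encoder c row[i] else c) c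

-- the column's surviving tokens, as char lists
def pvColToksC (inputs : List (List Int)) (wList : List String) (eos pad : Int) (i : Nat) : List (List Char) :=
  inputs.filterMap (fun row =>
    if h : i < row.length then
      if row[i] ≠ eos ∧ row[i] ≠ pad then some (((PySem.List.pyGet? wList row[i]).getD "").toList)
      else none
    else none)

theorem pvStepA_get_ne (w : List String) (e pd : Int) (enc : Bool)
    (lof : List (List Char)) (s : Nat) (x : Int) (i : Nat) (h : i ≠ s) :
    (pvStepA w e pd enc lof ((s : Int), x))[i]? = lof[i]? := by
  unfold pvStepA
  split_ifs <;> simp_all [Int.toNat_natCast, (Ne.symm h)]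

theorem pvStepA_get_self (w : List String) (e pd : Int) (enc : Bool)
    (lof : List (List Char)) (s : Nat) (x : Int) :
    (pvStepA w e pd enc lof ((s : Int), x))[s]? = lof[s]?.map (fun c => pvUpd w e pd enc c x) := by
  unfold pvStepA pvUpd
  by_cases hs : s < lof.length
  · have hg : lof.getD s [] = lof[s]'hs := by
      simp [List.getD_eq_getElem?_getD, List.getElem?_eq_getElem hs]
    split_ifs <;> simp_all
  · have : lof[s]? = none := by simpa using List.getElem?_eq_none (by omega)
    split_ifs <;> simp_all

theorem pvFoldRow_get (w : List String) (e pd : Int) (enc : Bool)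
    (row : List Int) (s i : Nat) (lof : List (List Char)) :
    ((PySem.List.enumerate row (s : Int)).foldl (pvStepA w e pd enc) lof)[i]? =
      if h : s ≤ i ∧ i - s < row.length then
        lof[i]?.map (fun c => pvUpd w e pd enc c (row[i - s]'h.2))
      else lof[i]? := by
  induction row generalizing s lof with
  | nil => simp [PySem.List.enumerate_nil]
  | cons x xs ih =>
    rw [PySem.List.enumerate_cons]
    have hcast : (s : Int) + 1 = ((s + 1 : Nat) : Int) := by push_cast; ring
    simp only [List.foldl_cons, hcast, ih (s + 1)]
    by_cases hi : i = s
    · subst hi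
      rw [dif_neg (by omega), dif_pos ⟨le_refl i, by simp⟩]
      simpa using pvStepA_get_self w e pd enc lof i x
    · rw [pvStepA_get_ne w e pd enc lof s x i hi]
      by_cases hc : s ≤ i ∧ i - s < xs.length + 1
      · have hc' : s + 1 ≤ i ∧ i - (s + 1) < xs.length := by omega
        rw [dif_pos hc', dif_pos (by simpa using hc)]
        congr 1
        funext c
        congr 1
        have : i - s = (i - (s + 1)) + 1 := by omega
        simp [this]
      · rw [dif_neg (by omega), dif_neg (by simpa using hc)]

theorem pvFoldA_get (w : List String) (e pd : Int) (enc : Bool)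
    (inputs : List (List Int)) (lof : List (List Char)) (i : Nat) :
    (inputs.foldl (fun lof r => (PySem.List.enumerate r).foldl (pvStepA w e pd enc) lof) lof)[i]? =
      lof[i]?.map (fun c => pvCellFold w e pd enc i inputs c) := by
  induction inputs generalizing lof with
  | nil => simp [pvCellFold]
  | cons r rs ih =>
    simp only [List.foldl_cons, ih]
    have h0 := pvFoldRow_get w e pd enc r 0 i lof
    simp only [Int.natCast_zero] at h0  -- enumerate r = enumerate r 0
    rw [show PySem.List.enumerate r = PySem.List.enumerate r (0 : Int) from rfl] at *
    rw [h0]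
    by_cases h : i < r.length
    · rw [dif_pos ⟨Nat.zero_le i, by simpa using h⟩]
      cases lof[i]? <;> simp [pvCellFold, dif_pos h]
    · rw [dif_neg (by omega)]
      cases lof[i]? <;> simp [pvCellFold, dif_neg h]

theorem pvColTokens_toList (inputs : List (List Int)) (w : List String) (e pd : Int) (i : Nat) :
    (pvColTokens inputs w e pd i).map String.toList = pvColToksC inputs w e pd i := by
  unfold pvColTokens pvColToksC
  suffices h : ∀ acc : List String,
      (inputs.foldl (fun toks row =>
        if h : i < row.length then
          if row[i] ≠ e ∧ row[i] ≠ pd then toks ++ [(PySem.List.pyGet? w row[i]).getD ""]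
          else toks
        else toks) acc).map String.toList =
      acc.map String.toList ++ inputs.filterMap (fun row =>
        if h : i < row.length then
          if row[i] ≠ e ∧ row[i] ≠ pd then some (((PySem.List.pyGet? w row[i]).getD "").toList)
          else none
        else none) by
    simpa using h []
  induction inputs with
  | nil => simp
  | cons r rs ih =>
    intro acc
    simp only [List.foldl_cons, List.filterMap_cons]
    split_ifs with h1 h2 <;> simp [ih, List.append_assoc]

theorem pvCellFold_false (w : List String) (e pd : Int) (i : Nat)
    (inputs : List (List Int)) (c : List Char) :
    pvCellFold w e pd false i inputs c =
      c ++ (pvColToksC inputs w e pd i).flatMap (fun t => ' ' :: t) := by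
  induction inputs generalizing c with
  | nil => simp [pvCellFold, pvColToksC]
  | cons r rs ih =>
    have hstep : pvCellFold w e pd false i (r :: rs) c
        = pvCellFold w e pd false i rs (if h : i < r.length then pvUpd w e pd false c (r[i]'h) else c) := rfl
    rw [hstep, ih]
    unfold pvColToksC
    rw [List.filterMap_cons]
    split_ifs with h1 h2
    · simp [pvUpd, h2]
    · simp [pvUpd, h2]
    · simp

theorem pvCellFold_true (w : List String) (e pd : Int) (i : Nat)
    (inputs : List (List Int)) (c : List Char) :
    pvCellFold w e pd true i inputs c =
      (pvColToksC inputs w e pd i).reverse.flatMap (fun t => t ++ [' ']) ++ c := by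
  induction inputs generalizing c with
  | nil => simp [pvCellFold, pvColToksC]
  | cons r rs ih =>
    have hstep : pvCellFold w e pd true i (r :: rs) c
        = pvCellFold w e pd true i rs (if h : i < r.length then pvUpd w e pd true c (r[i]'h) else c) := rfl
    rw [hstep, ih]
    unfold pvColToksC
    rw [List.filterMap_cons]
    split_ifs with h1 h2
    · simp [pvUpd, h2]
    · simp [pvUpd, h2]
    · simp

theorem pvFlatMap_space_left (ts : List (List Char)) (hts : ts ≠ []) :
    ts.flatMap (fun t => ' ' :: t) = ' ' :: PySem.Chars.join [' '] ts := by
  induction ts with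
  | nil => simp at hts
  | cons t us ih =>
    cases us with
    | nil => simp [PySem.Chars.join, List.intercalate, List.intersperse]
    | cons u vs =>
      rw [PySem.Chars.join_cons_cons]
      simp only [List.flatMap_cons] at *
      rw [ih (by simp)]
      simp

theorem pvFlatMap_space_right (ts : List (List Char)) (hts : ts ≠ []) :
    ts.flatMap (fun t => t ++ [' ']) = PySem.Chars.join [' '] ts ++ [' '] := by
  induction ts with
  | nil => simp at hts
  | cons t us ih =>
    cases us with
    | nil => simp [PySem.Chars.join, List.intercalate, List.intersperse]
    | cons u vs =>
      rw [PySem.Chars.join_cons_cons]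
      simp only [List.flatMap_cons] at *
      rw [ih (by simp)]
      simp

theorem pvStrip_space_cons (x : List Char) :
    PySem.Chars.strip (' ' :: x) = PySem.Chars.strip x := by
  simp [PySem.Chars.strip, PySem.Chars.lstrip, List.dropWhile_cons_of_pos,
    show PySem.Chars.isspace ' ' = true from by decide]

theorem pvStrip_space_append (x : List Char) :
    PySem.Chars.strip (x ++ [' ']) = PySem.Chars.strip x := by
  simp only [PySem.Chars.strip, PySem.Chars.lstrip, PySem.Chars.rstrip, List.dropWhile_append]
  split_ifs with h
  · simp only [List.isEmpty_iff] at h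
    simp [h, show PySem.Chars.isspace ' ' = true from by decide]
  · simp [List.dropWhile_cons_of_pos, show PySem.Chars.isspace ' ' = true from by decide]

theorem pvStrip_left (ts : List (List Char)) :
    PySem.Chars.strip (ts.flatMap (fun t => ' ' :: t)) =
      PySem.Chars.strip (PySem.Chars.join [' '] ts) := by
  by_cases h : ts = []
  · subst h; simp [PySem.Chars.join_nil]
  · rw [pvFlatMap_space_left ts h, pvStrip_space_cons]

theorem pvStrip_right (ts : List (List Char)) :
    PySem.Chars.strip (ts.flatMap (fun t => t ++ [' '])) =
      PySem.Chars.strip (PySem.Chars.join [' '] ts) := by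
  by_cases h : ts = []
  · subst h; simp [PySem.Chars.join_nil]
  · rw [pvFlatMap_space_right ts h, pvStrip_space_append]

-- main equivalence: the two ports agree on every input
theorem pvMain (inputs : List (List Int)) (wList : List String) (encoder : Bool) :
    translateToSentences inputs wList encoder = translateToSentences_alt inputs wList encoder := by
  simp only [translateToSentences, translateToSentences_alt]
  apply List.ext_getElem?
  intro n
  rw [List.getElem?_map, List.getElem?_map,
    pvFoldA_get wList (((PySem.List.index? wList "<EOS>").getD 0 : Nat) : Int)
      (((PySem.List.index? wList "<pad>").getD 0 : Nat) : Int) encoder inputs _ n]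
  by_cases hn : n < (inputs.headD []).length
  · rw [List.getElem?_eq_getElem (by simpa using hn : n < (List.replicate (inputs.headD []).length ([] : List Char)).length),
      List.getElem?_eq_getElem (by simpa using hn : n < (List.range (inputs.headD []).length).length)]
    simp only [List.getElem_replicate, List.getElem_range, Option.map_some]
    congr 1
    apply String.toList_inj.mp
    rw [String.toList_ofList, PySem.Str.toList_strip, PySem.Str.toList_join]
    have hsep : (" " : String).toList = [' '] := by decide
    rw [hsep]
    cases encoder with
    | false =>
      rw [pvCellFold_false]
      simp only [List.nil_append, Bool.false_eq_true, if_false]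
      rw [pvColTokens_toList]
      exact pvStrip_left _
    | true =>
      rw [pvCellFold_true]
      simp only [List.append_nil, if_true]
      rw [List.map_reverse, pvColTokens_toList]
      exact pvStrip_right _
  · rw [List.getElem?_eq_none (by simpa using hn),
      List.getElem?_eq_none (by simpa using hn)]
    rfl

-- ===== VERDICT (by name: the statement is the Claim_ definition above) =====
theorem translateToSentences_spec : Claim_equal_translateToSentences := by
  intro inputs wList encoder _ _
  exact pvMain inputs wList encoder
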